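-- pv_equiv track=rewrite | github.com/linhdvu14/cp-sols | sols/Google/KickStart/2021/2021_A/B_L_Shaped_Plots.py | solve
-- ===== SOURCE A (Python) =====
-- def solve(nr,nc,grid):
-- 	# max num contiguous ones from grid[r][c]
-- 	up = [[0]*nc for _ in range(nr)]
-- 	down = [[0]*nc for _ in range(nr)]
-- 	left = [[0]*nc for _ in range(nr)]
-- 	right = [[0]*nc for _ in range(nr)]
--
-- 	for r in range(nr):
-- 		for c in range(nc):
-- 			if grid[r][c] == 0: continue
-- 			up[r][c] = 1 + up[r-1][c] if r>0 else 1
-- 			left[r][c] = 1 + left[r][c-1] if c>0 else 1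
--
-- 	for r in range(nr-1,-1,-1):
-- 		for c in range(nc-1,-1,-1):
-- 			if grid[r][c] == 0: continue
-- 			down[r][c] = 1 + down[r+1][c] if r<nr-1 else 1
-- 			right[r][c] = 1 + right[r][c+1] if c<nc-1 else 1
--
-- 	res = 0
-- 	for r in range(nr):
-- 		for c in range(nc):
-- 			numu,numd,numl,numr = up[r][c],down[r][c],left[r][c],right[r][c]
-- 			for x,y in [(numu,numl),(numu,numr),(numd,numl),(numd,numr)]:
-- 				res += max(0,min(x//2,y)-1) + max(0,min(y//2,x)-1)
--
-- 	return res
-- ===== SOURCE B (Python) =====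
-- def solve(nr, nc, grid):
--     res = 0
--     for r in range(nr):
--         for c in range(nc):
--             if grid[r][c] == 0:
--                 continue
--             u = 0
--             i = r
--             while i >= 0 and grid[i][c] != 0:
--                 u += 1
--                 i -= 1
--             d = 0
--             i = r
--             while i < nr and grid[i][c] != 0:
--                 d += 1
--                 i += 1
--             l = 0
--             j = c
--             while j >= 0 and grid[r][j] != 0:
--                 l += 1
--                 j -= 1
--             rt = 0
--             j = c
--             while j < nc and grid[r][j] != 0:
--                 rt += 1
--                 j += 1
--             for x, y in ((u, l), (u, rt), (d, l), (d, rt)):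
--                 res += max(0, min(x // 2, y) - 1) + max(0, min(y // 2, x) - 1)
--     return res
-- ===== Notes on version B (the rewrite author's own statement) =====
-- stated objective: alternative
-- what changed: B drops A's four precomputed DP arm-length tables and instead, for each non-zero cell, scans outward in the four directions with while loops to measure the arms directly, applying the same counting formula; this trades A's O(nr*nc) extra memory for per-cell rescans.
import Mathlib
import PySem

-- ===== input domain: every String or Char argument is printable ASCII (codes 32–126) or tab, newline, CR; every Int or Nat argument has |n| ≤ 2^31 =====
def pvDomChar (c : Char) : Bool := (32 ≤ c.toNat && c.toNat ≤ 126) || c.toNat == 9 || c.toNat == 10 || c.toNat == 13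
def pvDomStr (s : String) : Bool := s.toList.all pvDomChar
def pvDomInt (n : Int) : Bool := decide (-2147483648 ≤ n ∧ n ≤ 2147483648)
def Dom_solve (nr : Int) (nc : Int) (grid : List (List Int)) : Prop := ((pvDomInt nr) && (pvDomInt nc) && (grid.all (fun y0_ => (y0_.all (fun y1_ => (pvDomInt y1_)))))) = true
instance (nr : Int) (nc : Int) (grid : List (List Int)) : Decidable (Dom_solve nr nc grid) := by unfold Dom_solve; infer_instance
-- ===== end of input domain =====

-- B replaces A's four DP arm-length tables by direct per-cell outward while-loop scans (same counting
-- formula, no auxiliary tables); objective: alternative algorithm, not claimed faster.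

-- ===== PORT A =====
-- grid[i][j] / table[i][j] read at a non-negative, in-range index (every read below is guarded so;
-- out-of-range Python reads raise and are excluded by Pre_solve)
def pvCell (t : List (List Int)) (i j : Int) : Int := (t.getD i.toNat []).getD j.toNat 0

-- table[i][j] = v  (indices non-negative and in range at every use)
def pvSet2 (t : List (List Int)) (i j : Int) (v : Int) : List (List Int) :=
  t.set i.toNat ((t.getD i.toNat []).set j.toNat v)

-- body of A's first double loop: update (up, left) at (r, c)
def pvLoop1Inner (grid : List (List Int)) (r : Int)
    (st : List (List Int) × List (List Int)) (c : Int) : List (List Int) × List (List Int) :=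
  if pvCell grid r c = 0 then st
  else (pvSet2 st.1 r c (if 0 < r then 1 + pvCell st.1 (r - 1) c else 1),
        pvSet2 st.2 r c (if 0 < c then 1 + pvCell st.2 r (c - 1) else 1))

-- body of A's second double loop: update (down, right) at (r, c)
def pvLoop2Inner (grid : List (List Int)) (nr nc : Int) (r : Int)
    (st : List (List Int) × List (List Int)) (c : Int) : List (List Int) × List (List Int) :=
  if pvCell grid r c = 0 then st
  else (pvSet2 st.1 r c (if r < nr - 1 then 1 + pvCell st.1 (r + 1) c else 1),
        pvSet2 st.2 r c (if c < nc - 1 then 1 + pvCell st.2 r (c + 1) else 1))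

-- the shared `for x,y in [...]` accumulation step
def pvF4 (res : Int) (xy : Int × Int) : Int :=
  res + max 0 (min (PySem.Int.floordiv xy.1 2) xy.2 - 1)
      + max 0 (min (PySem.Int.floordiv xy.2 2) xy.1 - 1)

def solve (nr : Int) (nc : Int) (grid : List (List Int)) : Int :=
  let zero : List (List Int) := List.replicate nr.toNat (List.replicate nc.toNat 0)
  let ul := (PySem.List.pyRange 0 nr 1).foldl
    (fun st r => (PySem.List.pyRange 0 nc 1).foldl (pvLoop1Inner grid r) st) (zero, zero)
  let dr := (PySem.List.pyRange (nr - 1) (-1) (-1)).foldl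
    (fun st r => (PySem.List.pyRange (nc - 1) (-1) (-1)).foldl (pvLoop2Inner grid nr nc r) st) (zero, zero)
  (PySem.List.pyRange 0 nr 1).foldl
    (fun res r => (PySem.List.pyRange 0 nc 1).foldl
      (fun res c =>
        let numu := pvCell ul.1 r c
        let numd := pvCell dr.1 r c
        let numl := pvCell ul.2 r c
        let numr := pvCell dr.2 r c
        [(numu, numl), (numu, numr), (numd, numl), (numd, numr)].foldl pvF4 res) res) 0

-- ===== PORT B =====
-- the four while loops of Source B; each carries its counter and the moving index
def pvScanUp (grid : List (List Int)) (c : Int) (u i : Int) : Int :=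
  if h : 0 ≤ i ∧ pvCell grid i c ≠ 0 then pvScanUp grid c (u + 1) (i - 1) else u
termination_by (i + 1).toNat
decreasing_by omega

def pvScanDown (grid : List (List Int)) (nr c : Int) (d i : Int) : Int :=
  if h : i < nr ∧ pvCell grid i c ≠ 0 then pvScanDown grid nr c (d + 1) (i + 1) else d
termination_by (nr - i).toNat
decreasing_by omega

def pvScanLeft (grid : List (List Int)) (r : Int) (l j : Int) : Int :=
  if h : 0 ≤ j ∧ pvCell grid r j ≠ 0 then pvScanLeft grid r (l + 1) (j - 1) else l
termination_by (j + 1).toNat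
decreasing_by omega

def pvScanRight (grid : List (List Int)) (nc r : Int) (t j : Int) : Int :=
  if h : j < nc ∧ pvCell grid r j ≠ 0 then pvScanRight grid nc r (t + 1) (j + 1) else t
termination_by (nc - j).toNat
decreasing_by omega

def solve_alt (nr : Int) (nc : Int) (grid : List (List Int)) : Int :=
  (PySem.List.pyRange 0 nr 1).foldl
    (fun res r => (PySem.List.pyRange 0 nc 1).foldl
      (fun res c =>
        if pvCell grid r c = 0 then res
        else
          let u := pvScanUp grid c 0 r
          let d := pvScanDown grid nr c 0 r
          let l := pvScanLeft grid r 0 c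
          let rt := pvScanRight grid nc r 0 c
          [(u, l), (u, rt), (d, l), (d, rt)].foldl pvF4 res) res) 0

-- ===== PRECONDITION & SPEC =====
-- Pre_solve: exactly the inputs where Python A returns (no IndexError): when both dimensions are
-- positive, the grid must have at least nr rows and each of the first nr rows at least nc entries.
def Pre_solve (nr : Int) (nc : Int) (grid : List (List Int)) : Prop :=
  0 < nr → 0 < nc →
    (nr ≤ (grid.length : Int) ∧ ∀ row ∈ grid.take nr.toNat, nc ≤ (row.length : Int))
instance (nr : Int) (nc : Int) (grid : List (List Int)) : Decidable (Pre_solve nr nc grid) := by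
  unfold Pre_solve; infer_instance

def pvWitness_solve : Int × Int × List (List Int) := (2, 3, [[1, 1, 0], [1, 1, 1]])

def Spec_solve (nr : Int) (nc : Int) (grid : List (List Int)) (out : Int) : Prop := out = solve_alt nr nc grid
instance (nr : Int) (nc : Int) (grid : List (List Int)) (out : Int) : Decidable (Spec_solve nr nc grid out) := by unfold Spec_solve; infer_instance

-- ===== CLAIM (what is proved, stated in full; the proofs are below) =====
def Claim_equal_solve : Prop := ∀ (nr : Int) (nc : Int) (grid : List (List Int)), Dom_solve nr nc grid → Pre_solve nr nc grid → Spec_solve nr nc grid (solve nr nc grid)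

-- ===== LEMMAS AND PROOFS =====

-- Nat-indexed accessor for grids and tables
def gN (t : List (List Int)) (r c : Nat) : Int := (t.getD r []).getD c 0

@[simp] lemma pvCell_cast (t : List (List Int)) (r c : Nat) : pvCell t ↑r ↑c = gN t r c := by
  simp [pvCell, gN]

@[simp] lemma pvCell_zero_left (t : List (List Int)) (c : Nat) : pvCell t 0 ↑c = gN t 0 c := by
  simp [pvCell, gN]

@[simp] lemma pvCell_zero_right (t : List (List Int)) (r : Nat) : pvCell t ↑r 0 = gN t r 0 := by
  simp [pvCell, gN]

@[simp] lemma pvCell_add_one_left (t : List (List Int)) (r c : Nat) :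
    pvCell t (↑r + 1) ↑c = gN t (r + 1) c := by
  have h : ((r : Int) + 1).toNat = r + 1 := by omega
  simp [pvCell, gN, h]

@[simp] lemma pvCell_add_one_right (t : List (List Int)) (r c : Nat) :
    pvCell t ↑r (↑c + 1) = gN t r (c + 1) := by
  have h : ((c : Int) + 1).toNat = c + 1 := by omega
  simp [pvCell, gN, h]

-- arm lengths as recursive specifications
def upRun (grid : List (List Int)) : Nat → Nat → Int
  | 0, c => if gN grid 0 c = 0 then 0 else 1
  | r + 1, c => if gN grid (r + 1) c = 0 then 0 else 1 + upRun grid r c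

def leftRun (grid : List (List Int)) (r : Nat) : Nat → Int
  | 0 => if gN grid r 0 = 0 then 0 else 1
  | c + 1 => if gN grid r (c + 1) = 0 then 0 else 1 + leftRun grid r c

def downRun (grid : List (List Int)) (n : Nat) (r c : Nat) : Int :=
  if gN grid r c = 0 then 0 else if r + 1 < n then 1 + downRun grid n (r + 1) c else 1
termination_by n - r

def rightRun (grid : List (List Int)) (m : Nat) (r c : Nat) : Int :=
  if gN grid r c = 0 then 0 else if c + 1 < m then 1 + rightRun grid m r (c + 1) else 1
termination_by m - c

lemma runs_zero (grid : List (List Int)) (n m r c : Nat) (h : gN grid r c = 0) :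
    upRun grid r c = 0 ∧ leftRun grid r c = 0 ∧ downRun grid n r c = 0 ∧ rightRun grid m r c = 0 := by
  refine ⟨?_, ?_, ?_, ?_⟩
  · cases r <;> simp [upRun, h]
  · cases c <;> simp [leftRun, h]
  · rw [downRun]; simp [h]
  · rw [rightRun]; simp [h]

-- B's while loops compute the runs
lemma scanUp_eq (grid : List (List Int)) (cN : Nat) :
    ∀ (rN : Nat) (u : Int), pvScanUp grid ↑cN u ↑rN = u + upRun grid rN cN := by
  intro rN
  induction rN with
  | zero =>
    intro u
    rw [pvScanUp]
    by_cases hg : gN grid 0 cN = 0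
    · rw [dif_neg (by simp [hg])]
      simp [upRun, hg]
    · rw [dif_pos ⟨by simp, by simpa using hg⟩]
      rw [pvScanUp]
      rw [dif_neg (by norm_num)]
      simp [upRun, hg]
  | succ r ih =>
    intro u
    rw [pvScanUp]
    by_cases hg : gN grid (r + 1) cN = 0
    · rw [dif_neg (by simp [hg])]
      simp [upRun, hg]
    · rw [dif_pos ⟨by positivity, by simp [hg]⟩]
      have h1 : (↑(r + 1) : Int) - 1 = ↑r := by push_cast; ring
      rw [h1, ih]
      simp [upRun, hg]
      ring

lemma scanLeft_eq (grid : List (List Int)) (rN : Nat) :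
    ∀ (cN : Nat) (l : Int), pvScanLeft grid ↑rN l ↑cN = l + leftRun grid rN cN := by
  intro cN
  induction cN with
  | zero =>
    intro l
    rw [pvScanLeft]
    by_cases hg : gN grid rN 0 = 0
    · rw [dif_neg (by simp [hg])]
      simp [leftRun, hg]
    · rw [dif_pos ⟨by simp, by simpa using hg⟩]
      rw [pvScanLeft]
      rw [dif_neg (by norm_num)]
      simp [leftRun, hg]
  | succ c ih =>
    intro l
    rw [pvScanLeft]
    by_cases hg : gN grid rN (c + 1) = 0
    · rw [dif_neg (by simp [hg])]
      simp [leftRun, hg]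
    · rw [dif_pos ⟨by positivity, by simp [hg]⟩]
      have h1 : (↑(c + 1) : Int) - 1 = ↑c := by push_cast; ring
      rw [h1, ih]
      simp [leftRun, hg]
      ring

lemma scanDown_eq (grid : List (List Int)) (n cN : Nat) :
    ∀ (k rN : Nat), n - rN ≤ k → rN < n → ∀ d : Int,
      pvScanDown grid ↑n ↑cN d ↑rN = d + downRun grid n rN cN := by
  intro k
  induction k with
  | zero => intro rN hk hrn d; omega
  | succ k ih =>
    intro rN hk hrn d
    rw [pvScanDown]
    by_cases hg : gN grid rN cN = 0
    · rw [dif_neg (by simp [hg])]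
      rw [downRun]
      simp [hg]
    · by_cases hr2 : rN + 1 < n
      · rw [dif_pos ⟨by exact_mod_cast hrn, by simp [hg]⟩]
        have h1 : (↑rN : Int) + 1 = ↑(rN + 1) := by push_cast; ring
        have hd : downRun grid n rN cN = 1 + downRun grid n (rN + 1) cN := by
          rw [downRun]; simp [hg, hr2]
        rw [h1, ih (rN + 1) (by omega) hr2, hd]
        ring
      · rw [dif_pos ⟨by exact_mod_cast hrn, by simp [hg]⟩]
        rw [pvScanDown]
        rw [dif_neg (by intro hcon; have h2 := hcon.1; omega)]
        rw [downRun]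
        simp [hg, hr2]

lemma scanRight_eq (grid : List (List Int)) (m rN : Nat) :
    ∀ (k cN : Nat), m - cN ≤ k → cN < m → ∀ t : Int,
      pvScanRight grid ↑m ↑rN t ↑cN = t + rightRun grid m rN cN := by
  intro k
  induction k with
  | zero => intro cN hk hcn t; omega
  | succ k ih =>
    intro cN hk hcn t
    rw [pvScanRight]
    by_cases hg : gN grid rN cN = 0
    · rw [dif_neg (by simp [hg])]
      rw [rightRun]
      simp [hg]
    · by_cases hc2 : cN + 1 < m
      · rw [dif_pos ⟨by exact_mod_cast hcn, by simp [hg]⟩]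
        have h1 : (↑cN : Int) + 1 = ↑(cN + 1) := by push_cast; ring
        have hd : rightRun grid m rN cN = 1 + rightRun grid m rN (cN + 1) := by
          rw [rightRun]; simp [hg, hc2]
        rw [h1, ih (cN + 1) (by omega) hc2, hd]
        ring
      · rw [dif_pos ⟨by exact_mod_cast hcn, by simp [hg]⟩]
        rw [pvScanRight]
        rw [dif_neg (by intro hcon; have h2 := hcon.1; omega)]
        rw [rightRun]
        simp [hg, hc2]

-- dimension bookkeeping for the tables
def dims (t : List (List Int)) (n m : Nat) : Prop :=
  t.length = n ∧ ∀ r, r < n → (t.getD r []).length = m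

lemma dims_replicate (n m : Nat) : dims (List.replicate n (List.replicate m (0:Int))) n m := by
  refine ⟨by simp, fun r hr => ?_⟩
  simp [List.getD, hr]

lemma gN_replicate (n m r c : Nat) : gN (List.replicate n (List.replicate m (0:Int))) r c = 0 := by
  by_cases hr : r < n
  · by_cases hc : c < m <;> simp [gN, List.getD, hr, hc]
  · simp [gN, List.getD, hr]

lemma length_pvSet2 (t : List (List Int)) (i j : Int) (v : Int) :
    (pvSet2 t i j v).length = t.length := by
  simp [pvSet2]

lemma rowlen_pvSet2 (t : List (List Int)) (i j : Int) (v : Int) (r' : Nat) :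
    ((pvSet2 t i j v).getD r' []).length = (t.getD r' []).length := by
  by_cases h : r' = i.toNat
  · subst h
    by_cases hl : i.toNat < t.length
    · simp only [pvSet2, List.getD]
      rw [List.getElem?_set_self hl]
      simp
    · simp [pvSet2, List.set_eq_of_length_le (show t.length ≤ i.toNat from by omega)]
  · simp only [pvSet2, List.getD]
    rw [List.getElem?_set_ne (show i.toNat ≠ r' from fun hh => h hh.symm)]

lemma dims_pvSet2 (t : List (List Int)) (i j v : Int) {n m : Nat} (h : dims t n m) :
    dims (pvSet2 t i j v) n m := by
  obtain ⟨h1, h2⟩ := h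
  exact ⟨by rw [length_pvSet2, h1], fun r hr => by rw [rowlen_pvSet2]; exact h2 r hr⟩

lemma gN_pvSet2_self (t : List (List Int)) (r c : Nat) (v : Int)
    (hr : r < t.length) (hc : c < (t.getD r []).length) :
    gN (pvSet2 t ↑r ↑c v) r c = v := by
  simp only [gN, pvSet2, List.getD, Int.toNat_natCast]
  rw [List.getElem?_set_self hr]
  simp only [Option.getD_some]
  rw [List.getElem?_set_self (by simpa [List.getD] using hc)]
  simp

lemma gN_pvSet2_ne (t : List (List Int)) (r c r' c' : Nat) (v : Int) (h : r' ≠ r ∨ c' ≠ c) :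
    gN (pvSet2 t ↑r ↑c v) r' c' = gN t r' c' := by
  rcases h with h | h
  · simp only [gN, pvSet2, List.getD, Int.toNat_natCast]
    rw [List.getElem?_set_ne (show r ≠ r' from fun hh => h hh.symm)]
  · by_cases hrr : r' = r
    · subst hrr
      simp only [gN, pvSet2, List.getD, Int.toNat_natCast]
      by_cases hl : r' < t.length
      · rw [List.getElem?_set_self hl]
        simp only [Option.getD_some]
        rw [List.getElem?_set_ne (show c ≠ c' from fun hh => h hh.symm)]
      · rw [List.set_eq_of_length_le (by omega)]
    · simp only [gN, pvSet2, List.getD, Int.toNat_natCast]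
      rw [List.getElem?_set_ne (show r ≠ r' from fun hh => hrr hh.symm)]

-- first double loop fills up/left with the runs, row after row
lemma loop1_row (grid : List (List Int)) (n m r : Nat) (hr : r < n)
    (st : List (List Int) × List (List Int)) (hU : dims st.1 n m) (hL : dims st.2 n m)
    (hUs : ∀ r' c', r' < n → c' < m → gN st.1 r' c' = if r' < r then upRun grid r' c' else 0)
    (hLs : ∀ r' c', r' < n → c' < m → gN st.2 r' c' = if r' < r then leftRun grid r' c' else 0) :
    ∀ j, j ≤ m →
      dims (((List.range j).map (fun k : Nat => (k : Int))).foldl (pvLoop1Inner grid ↑r) st).1 n m ∧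
      dims (((List.range j).map (fun k : Nat => (k : Int))).foldl (pvLoop1Inner grid ↑r) st).2 n m ∧
      (∀ r' c', r' < n → c' < m →
        gN (((List.range j).map (fun k : Nat => (k : Int))).foldl (pvLoop1Inner grid ↑r) st).1 r' c' =
          if r' < r ∨ (r' = r ∧ c' < j) then upRun grid r' c' else 0) ∧
      (∀ r' c', r' < n → c' < m →
        gN (((List.range j).map (fun k : Nat => (k : Int))).foldl (pvLoop1Inner grid ↑r) st).2 r' c' =
          if r' < r ∨ (r' = r ∧ c' < j) then leftRun grid r' c' else 0) := by
  intro j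
  induction j with
  | zero =>
    intro _
    simp only [List.range_zero, List.map_nil, List.foldl_nil]
    refine ⟨hU, hL, ?_, ?_⟩
    · intro r' c' h1 h2
      rw [hUs r' c' h1 h2]
      exact if_congr (by omega) rfl rfl
    · intro r' c' h1 h2
      rw [hLs r' c' h1 h2]
      exact if_congr (by omega) rfl rfl
  | succ j ih =>
    intro hj
    obtain ⟨ihU, ihL, ihUs, ihLs⟩ := ih (by omega)
    rw [List.range_succ, List.map_append, List.foldl_append]
    simp only [List.map_cons, List.map_nil, List.foldl_cons, List.foldl_nil]
    set st' := ((List.range j).map (fun k : Nat => (k : Int))).foldl (pvLoop1Inner grid ↑r) st with hst'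
    by_cases hg : gN grid r j = 0
    · rw [show pvLoop1Inner grid ↑r st' ↑j = st' from by
        simp only [pvLoop1Inner, pvCell_cast]; rw [if_pos hg]]
      refine ⟨ihU, ihL, ?_, ?_⟩
      · intro r' c' h1 h2
        rw [ihUs r' c' h1 h2]
        by_cases e : r' = r ∧ c' = j
        · obtain ⟨e1, e2⟩ := e
          subst e1; subst e2
          have h0 : upRun grid r' c' = 0 := (runs_zero grid n m r' c' hg).1
          simp [h0]
        · exact if_congr (by omega) rfl rfl
      · intro r' c' h1 h2
        rw [ihLs r' c' h1 h2]
        by_cases e : r' = r ∧ c' = j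
        · obtain ⟨e1, e2⟩ := e
          subst e1; subst e2
          have h0 : leftRun grid r' c' = 0 := (runs_zero grid n m r' c' hg).2.1
          simp [h0]
        · exact if_congr (by omega) rfl rfl
    · have hstep : pvLoop1Inner grid ↑r st' ↑j =
        (pvSet2 st'.1 ↑r ↑j (upRun grid r j), pvSet2 st'.2 ↑r ↑j (leftRun grid r j)) := by
        simp only [pvLoop1Inner, pvCell_cast]
        rw [if_neg hg]
        have hvU : (if 0 < (↑r:Int) then 1 + pvCell st'.1 (↑r - 1) ↑j else 1) = upRun grid r j := by
          cases r with
          | zero => simp [upRun, hg]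
          | succ rp =>
            rw [if_pos (by positivity)]
            have hc1 : ((rp + 1 : Nat) : Int) - 1 = ↑rp := by push_cast; ring
            rw [hc1, pvCell_cast, ihUs rp j (by omega) (by omega), if_pos (by omega)]
            simp [upRun, hg]
        have hvL : (if 0 < (↑j:Int) then 1 + pvCell st'.2 ↑r (↑j - 1) else 1) = leftRun grid r j := by
          cases j with
          | zero => simp [leftRun, hg]
          | succ jp =>
            rw [if_pos (by positivity)]
            have hc1 : ((jp + 1 : Nat) : Int) - 1 = ↑jp := by push_cast; ring
            rw [hc1, pvCell_cast, ihLs r jp (by omega) (by omega), if_pos (by omega)]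
            simp [leftRun, hg]
        rw [hvU, hvL]
      rw [hstep]
      refine ⟨dims_pvSet2 _ _ _ _ ihU, dims_pvSet2 _ _ _ _ ihL, ?_, ?_⟩
      · intro r' c' h1 h2
        by_cases e : r' = r ∧ c' = j
        · obtain ⟨e1, e2⟩ := e
          subst e1; subst e2
          rw [gN_pvSet2_self _ _ _ _ (by rw [ihU.1]; omega) (by rw [ihU.2 r' (by omega)]; omega)]
          rw [if_pos (by omega)]
        · rw [gN_pvSet2_ne _ _ _ _ _ _ (by omega), ihUs r' c' h1 h2]
          exact if_congr (by omega) rfl rfl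
      · intro r' c' h1 h2
        by_cases e : r' = r ∧ c' = j
        · obtain ⟨e1, e2⟩ := e
          subst e1; subst e2
          rw [gN_pvSet2_self _ _ _ _ (by rw [ihL.1]; omega) (by rw [ihL.2 r' (by omega)]; omega)]
          rw [if_pos (by omega)]
        · rw [gN_pvSet2_ne _ _ _ _ _ _ (by omega), ihLs r' c' h1 h2]
          exact if_congr (by omega) rfl rfl

lemma loop1_spec (grid : List (List Int)) (n m : Nat) :
    ∀ k, k ≤ n →
      dims (((List.range k).map (fun k : Nat => (k : Int))).foldl
        (fun st r => ((List.range m).map (fun k : Nat => (k : Int))).foldl (pvLoop1Inner grid r) st)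
        (List.replicate n (List.replicate m 0), List.replicate n (List.replicate m 0))).1 n m ∧
      dims (((List.range k).map (fun k : Nat => (k : Int))).foldl
        (fun st r => ((List.range m).map (fun k : Nat => (k : Int))).foldl (pvLoop1Inner grid r) st)
        (List.replicate n (List.replicate m 0), List.replicate n (List.replicate m 0))).2 n m ∧
      (∀ r' c', r' < n → c' < m →
        gN (((List.range k).map (fun k : Nat => (k : Int))).foldl
          (fun st r => ((List.range m).map (fun k : Nat => (k : Int))).foldl (pvLoop1Inner grid r) st)
          (List.replicate n (List.replicate m 0), List.replicate n (List.replicate m 0))).1 r' c' =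
          if r' < k then upRun grid r' c' else 0) ∧
      (∀ r' c', r' < n → c' < m →
        gN (((List.range k).map (fun k : Nat => (k : Int))).foldl
          (fun st r => ((List.range m).map (fun k : Nat => (k : Int))).foldl (pvLoop1Inner grid r) st)
          (List.replicate n (List.replicate m 0), List.replicate n (List.replicate m 0))).2 r' c' =
          if r' < k then leftRun grid r' c' else 0) := by
  intro k
  induction k with
  | zero =>
    intro _
    simp only [List.range_zero, List.map_nil, List.foldl_nil]
    refine ⟨dims_replicate n m, dims_replicate n m, ?_, ?_⟩ <;>
      (intro r' c' h1 h2; simp [gN_replicate])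
  | succ k ih =>
    intro hk
    obtain ⟨ihU, ihL, ihUs, ihLs⟩ := ih (by omega)
    rw [List.range_succ, List.map_append, List.foldl_append]
    simp only [List.map_cons, List.map_nil, List.foldl_cons, List.foldl_nil]
    obtain ⟨hU', hL', hUs', hLs'⟩ :=
      loop1_row grid n m k (by omega) _ ihU ihL ihUs ihLs m le_rfl
    refine ⟨hU', hL', ?_, ?_⟩
    · intro r' c' h1 h2
      rw [hUs' r' c' h1 h2]
      exact if_congr (by omega) rfl rfl
    · intro r' c' h1 h2
      rw [hLs' r' c' h1 h2]
      exact if_congr (by omega) rfl rfl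

-- second double loop fills down/right with the runs, from the last row upwards
lemma loop2_row (grid : List (List Int)) (n m r : Nat) (hr : r < n)
    (st : List (List Int) × List (List Int)) (hD : dims st.1 n m) (hR : dims st.2 n m)
    (hDs : ∀ r' c', r' < n → c' < m → gN st.1 r' c' = if r < r' then downRun grid n r' c' else 0)
    (hRs : ∀ r' c', r' < n → c' < m → gN st.2 r' c' = if r < r' then rightRun grid m r' c' else 0) :
    ∀ j, j ≤ m →
      dims (((List.range j).map (fun k : Nat => ((m : Int) - 1 - (k : Int)))).foldl (pvLoop2Inner grid ↑n ↑m ↑r) st).1 n m ∧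
      dims (((List.range j).map (fun k : Nat => ((m : Int) - 1 - (k : Int)))).foldl (pvLoop2Inner grid ↑n ↑m ↑r) st).2 n m ∧
      (∀ r' c', r' < n → c' < m →
        gN (((List.range j).map (fun k : Nat => ((m : Int) - 1 - (k : Int)))).foldl (pvLoop2Inner grid ↑n ↑m ↑r) st).1 r' c' =
          if r < r' ∨ (r' = r ∧ m - j ≤ c') then downRun grid n r' c' else 0) ∧
      (∀ r' c', r' < n → c' < m →
        gN (((List.range j).map (fun k : Nat => ((m : Int) - 1 - (k : Int)))).foldl (pvLoop2Inner grid ↑n ↑m ↑r) st).2 r' c' =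
          if r < r' ∨ (r' = r ∧ m - j ≤ c') then rightRun grid m r' c' else 0) := by
  intro j
  induction j with
  | zero =>
    intro _
    simp only [List.range_zero, List.map_nil, List.foldl_nil]
    refine ⟨hD, hR, ?_, ?_⟩
    · intro r' c' h1 h2
      rw [hDs r' c' h1 h2]
      exact if_congr (by omega) rfl rfl
    · intro r' c' h1 h2
      rw [hRs r' c' h1 h2]
      exact if_congr (by omega) rfl rfl
  | succ j ih =>
    intro hj
    obtain ⟨ihD, ihR, ihDs, ihRs⟩ := ih (by omega)
    rw [List.range_succ, List.map_append, List.foldl_append]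
    simp only [List.map_cons, List.map_nil, List.foldl_cons, List.foldl_nil]
    set st' := ((List.range j).map (fun k : Nat => ((m : Int) - 1 - (k : Int)))).foldl
      (pvLoop2Inner grid ↑n ↑m ↑r) st with hst'
    have hcast : ((m : Int) - 1 - (j : Int)) = ((m - 1 - j : Nat) : Int) := by omega
    rw [hcast]
    set c : Nat := m - 1 - j with hc
    have hcj : c + j + 1 = m := by omega
    by_cases hg : gN grid r c = 0
    · rw [show pvLoop2Inner grid ↑n ↑m ↑r st' ↑c = st' from by
        simp only [pvLoop2Inner, pvCell_cast]; rw [if_pos hg]]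
      refine ⟨ihD, ihR, ?_, ?_⟩
      · intro r' c' h1 h2
        rw [ihDs r' c' h1 h2]
        by_cases e : r' = r ∧ c' = c
        · obtain ⟨e1, e2⟩ := e
          subst e1; subst e2
          have h0 : downRun grid n r' c = 0 := (runs_zero grid n m r' c hg).2.2.1
          simp [h0]
        · exact if_congr (by omega) rfl rfl
      · intro r' c' h1 h2
        rw [ihRs r' c' h1 h2]
        by_cases e : r' = r ∧ c' = c
        · obtain ⟨e1, e2⟩ := e
          subst e1; subst e2
          have h0 : rightRun grid m r' c = 0 := (runs_zero grid n m r' c hg).2.2.2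
          simp [h0]
        · exact if_congr (by omega) rfl rfl
    · have hstep : pvLoop2Inner grid ↑n ↑m ↑r st' ↑c =
        (pvSet2 st'.1 ↑r ↑c (downRun grid n r c), pvSet2 st'.2 ↑r ↑c (rightRun grid m r c)) := by
        simp only [pvLoop2Inner, pvCell_cast]
        rw [if_neg hg]
        have hvD : (if (↑r:Int) < ↑n - 1 then 1 + pvCell st'.1 (↑r + 1) ↑c else 1) =
            downRun grid n r c := by
          by_cases hr2 : r + 1 < n
          · have hd : downRun grid n r c = 1 + downRun grid n (r + 1) c := by
              rw [downRun]; simp [hg, hr2]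
            rw [if_pos (by omega), pvCell_add_one_left, ihDs (r + 1) c (by omega) (by omega),
              if_pos (by omega), hd]
          · rw [if_neg (by omega)]
            rw [downRun]
            simp [hg, hr2]
        have hvR : (if (↑c:Int) < ↑m - 1 then 1 + pvCell st'.2 ↑r (↑c + 1) else 1) =
            rightRun grid m r c := by
          by_cases hc2 : c + 1 < m
          · have hd : rightRun grid m r c = 1 + rightRun grid m r (c + 1) := by
              rw [rightRun]; simp [hg, hc2]
            rw [if_pos (by omega), pvCell_add_one_right, ihRs r (c + 1) (by omega) (by omega),
              if_pos (by omega), hd]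
          · rw [if_neg (by omega)]
            rw [rightRun]
            simp [hg, hc2]
        rw [hvD, hvR]
      rw [hstep]
      refine ⟨dims_pvSet2 _ _ _ _ ihD, dims_pvSet2 _ _ _ _ ihR, ?_, ?_⟩
      · intro r' c' h1 h2
        by_cases e : r' = r ∧ c' = c
        · obtain ⟨e1, e2⟩ := e
          subst e1; subst e2
          rw [gN_pvSet2_self _ _ _ _ (by rw [ihD.1]; omega) (by rw [ihD.2 r' (by omega)]; omega)]
          rw [if_pos (by omega)]
        · rw [gN_pvSet2_ne _ _ _ _ _ _ (by omega), ihDs r' c' h1 h2]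
          exact if_congr (by omega) rfl rfl
      · intro r' c' h1 h2
        by_cases e : r' = r ∧ c' = c
        · obtain ⟨e1, e2⟩ := e
          subst e1; subst e2
          rw [gN_pvSet2_self _ _ _ _ (by rw [ihR.1]; omega) (by rw [ihR.2 r' (by omega)]; omega)]
          rw [if_pos (by omega)]
        · rw [gN_pvSet2_ne _ _ _ _ _ _ (by omega), ihRs r' c' h1 h2]
          exact if_congr (by omega) rfl rfl

lemma loop2_spec (grid : List (List Int)) (n m : Nat) :
    ∀ k, k ≤ n →
      dims (((List.range k).map (fun k : Nat => ((n : Int) - 1 - (k : Int)))).foldl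
        (fun st r => ((List.range m).map (fun k : Nat => ((m : Int) - 1 - (k : Int)))).foldl (pvLoop2Inner grid ↑n ↑m r) st)
        (List.replicate n (List.replicate m 0), List.replicate n (List.replicate m 0))).1 n m ∧
      dims (((List.range k).map (fun k : Nat => ((n : Int) - 1 - (k : Int)))).foldl
        (fun st r => ((List.range m).map (fun k : Nat => ((m : Int) - 1 - (k : Int)))).foldl (pvLoop2Inner grid ↑n ↑m r) st)
        (List.replicate n (List.replicate m 0), List.replicate n (List.replicate m 0))).2 n m ∧
      (∀ r' c', r' < n → c' < m →
        gN (((List.range k).map (fun k : Nat => ((n : Int) - 1 - (k : Int)))).foldl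
          (fun st r => ((List.range m).map (fun k : Nat => ((m : Int) - 1 - (k : Int)))).foldl (pvLoop2Inner grid ↑n ↑m r) st)
          (List.replicate n (List.replicate m 0), List.replicate n (List.replicate m 0))).1 r' c' =
          if n - k ≤ r' then downRun grid n r' c' else 0) ∧
      (∀ r' c', r' < n → c' < m →
        gN (((List.range k).map (fun k : Nat => ((n : Int) - 1 - (k : Int)))).foldl
          (fun st r => ((List.range m).map (fun k : Nat => ((m : Int) - 1 - (k : Int)))).foldl (pvLoop2Inner grid ↑n ↑m r) st)
          (List.replicate n (List.replicate m 0), List.replicate n (List.replicate m 0))).2 r' c' =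
          if n - k ≤ r' then rightRun grid m r' c' else 0) := by
  intro k
  induction k with
  | zero =>
    intro _
    simp only [List.range_zero, List.map_nil, List.foldl_nil]
    refine ⟨dims_replicate n m, dims_replicate n m, ?_, ?_⟩ <;>
      (intro r' c' h1 h2; simp [gN_replicate]; omega)
  | succ k ih =>
    intro hk
    obtain ⟨ihD, ihR, ihDs, ihRs⟩ := ih (by omega)
    rw [List.range_succ, List.map_append, List.foldl_append]
    simp only [List.map_cons, List.map_nil, List.foldl_cons, List.foldl_nil]
    have hcast : ((n : Int) - 1 - (k : Int)) = ((n - 1 - k : Nat) : Int) := by omega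
    rw [hcast]
    have hDs' : ∀ r' c', r' < n → c' < m →
        gN (((List.range k).map (fun k : Nat => ((n : Int) - 1 - (k : Int)))).foldl
          (fun st r => ((List.range m).map (fun k : Nat => ((m : Int) - 1 - (k : Int)))).foldl
            (pvLoop2Inner grid ↑n ↑m r) st)
          (List.replicate n (List.replicate m 0), List.replicate n (List.replicate m 0))).1 r' c' =
          if n - 1 - k < r' then downRun grid n r' c' else 0 := by
      intro r' c' h1 h2
      rw [ihDs r' c' h1 h2]
      exact if_congr (by omega) rfl rfl
    have hRs' : ∀ r' c', r' < n → c' < m →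
        gN (((List.range k).map (fun k : Nat => ((n : Int) - 1 - (k : Int)))).foldl
          (fun st r => ((List.range m).map (fun k : Nat => ((m : Int) - 1 - (k : Int)))).foldl
            (pvLoop2Inner grid ↑n ↑m r) st)
          (List.replicate n (List.replicate m 0), List.replicate n (List.replicate m 0))).2 r' c' =
          if n - 1 - k < r' then rightRun grid m r' c' else 0 := by
      intro r' c' h1 h2
      rw [ihRs r' c' h1 h2]
      exact if_congr (by omega) rfl rfl
    obtain ⟨hD', hR', hDs'', hRs''⟩ :=
      loop2_row grid n m (n - 1 - k) (by omega) _ ihD ihR hDs' hRs' m le_rfl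
    refine ⟨hD', hR', ?_, ?_⟩
    · intro r' c' h1 h2
      rw [hDs'' r' c' h1 h2]
      exact if_congr (by omega) rfl rfl
    · intro r' c' h1 h2
      rw [hRs'' r' c' h1 h2]
      exact if_congr (by omega) rfl rfl

lemma pvF4_zero (res : Int) : pvF4 res (0, 0) = res := by
  simp [pvF4]


-- ===== VERDICT (by name: the statement is the Claim_ definition above) =====
theorem solve_spec : Claim_equal_solve := by
  intro nr nc grid _ _
  unfold Spec_solve
  by_cases hnr : 0 < nr
  case neg =>
    have h1 : PySem.List.pyRange 0 nr 1 = [] := PySem.List.pyRange_one_eq_nil (by omega)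
    have h2 : PySem.List.pyRange (nr - 1) (-1) (-1) = [] :=
      PySem.List.pyRange_neg_one_eq_nil (by omega)
    simp [solve, solve_alt, h1, h2]
  by_cases hnc : 0 < nc
  case neg =>
    have h1 : PySem.List.pyRange 0 nc 1 = [] := PySem.List.pyRange_one_eq_nil (by omega)
    have h2 : PySem.List.pyRange (nc - 1) (-1) (-1) = [] :=
      PySem.List.pyRange_neg_one_eq_nil (by omega)
    simp [solve, solve_alt, h1, h2]
  obtain ⟨n, rfl⟩ : ∃ n : Nat, nr = ↑n := ⟨nr.toNat, by omega⟩
  obtain ⟨m, rfl⟩ : ∃ m : Nat, nc = ↑m := ⟨nc.toNat, by omega⟩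
  have hr1 : PySem.List.pyRange 0 ↑n 1 = (List.range n).map (fun k : Nat => (k : Int)) := by
    simp [PySem.List.pyRange_one]
  have hr2 : PySem.List.pyRange 0 ↑m 1 = (List.range m).map (fun k : Nat => (k : Int)) := by
    simp [PySem.List.pyRange_one]
  have hr3 : PySem.List.pyRange (↑n - 1) (-1) (-1) =
      (List.range n).map (fun k : Nat => ((n : Int) - 1 - (k : Int))) := by
    rw [PySem.List.pyRange_neg_one, show ((n : Int) - 1 - (-1)).toNat = n from by omega]
  have hr4 : PySem.List.pyRange (↑m - 1) (-1) (-1) =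
      (List.range m).map (fun k : Nat => ((m : Int) - 1 - (k : Int))) := by
    rw [PySem.List.pyRange_neg_one, show ((m : Int) - 1 - (-1)).toNat = m from by omega]
  simp only [solve, solve_alt, hr1, hr2, hr3, hr4, Int.toNat_natCast]
  obtain ⟨_, _, hUs, hLs⟩ := loop1_spec grid n m n le_rfl
  obtain ⟨_, _, hDs, hRs⟩ := loop2_spec grid n m n le_rfl
  apply PySem.List.foldl_congr_mem
  intro acc x hx
  obtain ⟨r, hrmem, rfl⟩ := List.mem_map.mp hx
  have hrn : r < n := List.mem_range.mp hrmem
  apply PySem.List.foldl_congr_mem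
  intro acc2 y hy
  obtain ⟨c, hcmem, rfl⟩ := List.mem_map.mp hy
  have hcm : c < m := List.mem_range.mp hcmem
  have e1 := hUs r c hrn hcm; rw [if_pos hrn] at e1
  have e2 := hLs r c hrn hcm; rw [if_pos hrn] at e2
  have e3 := hDs r c hrn hcm; rw [if_pos (show n - n ≤ r by omega)] at e3
  have e4 := hRs r c hrn hcm; rw [if_pos (show n - n ≤ r by omega)] at e4
  have s1 := scanUp_eq grid c r 0; rw [zero_add] at s1
  have s2 := scanDown_eq grid n c n r (by omega) hrn 0; rw [zero_add] at s2
  have s3 := scanLeft_eq grid r c 0; rw [zero_add] at s3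
  have s4 := scanRight_eq grid m r m c (by omega) hcm 0; rw [zero_add] at s4
  simp only [pvCell_cast, e1, e2, e3, e4, s1, s2, s3, s4]
  by_cases hg : gN grid r c = 0
  · rw [if_pos hg]
    obtain ⟨z1, z2, z3, z4⟩ := runs_zero grid n m r c hg
    rw [z1, z2, z3, z4]
    simp [List.foldl_cons, List.foldl_nil, pvF4_zero]
  · rw [if_neg hg]
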